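-- pv_equiv track=rewrite | github.com/xrose3159/agentic_VLMdata_with_graph | step3_generate.py | _join_shared_target_phrase
-- ===== SOURCE A (Python) =====
-- _TAIL_TYPE_ENUM = {"TIME", "QUANTITY", "LOCATION", "PERSON", "ORG", "OTHER"}
--
-- def _normalize_tail_type(value) -> str:
--     if not isinstance(value, str):
--         return "OTHER"
--     normalized = value.strip().upper()
--     return normalized if normalized in _TAIL_TYPE_ENUM else "OTHER"
--
-- def _relation_slug(rel: str) -> str:
--     return rel.strip().lower().replace(" ", "_")
--
-- def _join_shared_target_phrase(rel_a: str, rel_b: str, shared_type: str) -> str: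
--     rel_a = _relation_slug(rel_a)
--     rel_b = _relation_slug(rel_b)
--     shared_type = _normalize_tail_type(shared_type)
--
--     if shared_type == "LOCATION":
--         if all(any(k in rel for k in ("performed_at", "staged_at", "played_at", "premiered_at", "opened_at")) for rel in (rel_a, rel_b)):
--             return "共同关联的演出地点"
--         if all(any(k in rel for k in ("headquartered", "based_in")) for rel in (rel_a, rel_b)):
--             return "共同关联的总部所在地"
--         if all(any(k in rel for k in ("born_in", "origin", "from")) for rel in (rel_a, rel_b)):
--             return "共同关联的出生地"
--         return "共同关联的地点"
--
--     if shared_type == "PERSON":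
--         if all(any(k in rel for k in ("founder", "founded_by")) for rel in (rel_a, rel_b)):
--             return "共同关联的创始人"
--         if all("ceo" in rel for rel in (rel_a, rel_b)):
--             return "共同关联的负责人"
--         if all(any(k in rel for k in ("author", "writer")) for rel in (rel_a, rel_b)):
--             return "共同关联的作者"
--         if all("lyrics" in rel for rel in (rel_a, rel_b)):
--             return "共同关联的作词者"
--         if all(any(k in rel for k in ("composer", "music_by")) for rel in (rel_a, rel_b)):
--             return "共同关联的作曲者"
--         if all(any(k in rel for k in ("director", "directed_by")) for rel in (rel_a, rel_b)):
--             return "共同关联的导演"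
--         return "共同关联到的人物"
--
--     if shared_type == "ORG":
--         if all(any(k in rel for k in ("headquartered", "based_in")) for rel in (rel_a, rel_b)):
--             return "共同关联的机构"
--         if all(any(k in rel for k in ("parent", "owned_by", "brand_of")) for rel in (rel_a, rel_b)):
--             return "共同关联的上级组织"
--         return "共同关联的组织"
--
--     return {
--         "PERSON": "共同关联到的人物",
--         "ORG": "共同关联的组织",
--         "LOCATION": "共同关联的地点",
--     }.get(shared_type, "共同关联的目标")
-- ===== SOURCE B (Python) =====
-- _TAIL_TYPE_ENUM = {"TIME", "QUANTITY", "LOCATION", "PERSON", "ORG", "OTHER"}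
--
-- def _normalize_tail_type(value):
--     if not isinstance(value, str):
--         return "OTHER"
--     normalized = value.strip().upper()
--     return normalized if normalized in _TAIL_TYPE_ENUM else "OTHER"
--
-- def _relation_slug(rel):
--     return rel.strip().lower().replace(" ", "_")
--
-- # For each type: the ordered keyword groups, the phrase for each group, and the
-- # type's default phrase.  Instead of testing both relations rule by rule, B
-- # extracts, for each relation INDEPENDENTLY, the set of group indices whose
-- # keywords occur in it, intersects the two sets, and answers with the phrase of
-- # the smallest common index (= the first rule both relations satisfy).
-- _TABLE = {
--     "LOCATION": (
--         [("performed_at", "staged_at", "played_at", "premiered_at", "opened_at"),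
--          ("headquartered", "based_in"),
--          ("born_in", "origin", "from")],
--         ["共同关联的演出地点", "共同关联的总部所在地", "共同关联的出生地"],
--         "共同关联的地点",
--     ),
--     "PERSON": (
--         [("founder", "founded_by"), ("ceo",), ("author", "writer"),
--          ("lyrics",), ("composer", "music_by"), ("director", "directed_by")],
--         ["共同关联的创始人", "共同关联的负责人", "共同关联的作者",
--          "共同关联的作词者", "共同关联的作曲者", "共同关联的导演"],
--         "共同关联到的人物",
--     ),
--     "ORG": (
--         [("headquartered", "based_in"), ("parent", "owned_by", "brand_of")],
--         ["共同关联的机构", "共同关联的上级组织"],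
--         "共同关联的组织",
--     ),
-- }
--
-- def _match_ids(rel, groups):
--     return {i for i, kws in enumerate(groups) if any(k in rel for k in kws)}
--
-- def _phrase_for(rel_a, rel_b, entry):
--     groups, phrases, default = entry
--     common = _match_ids(rel_a, groups) & _match_ids(rel_b, groups)
--     return phrases[min(common)] if common else default
--
-- def _join_shared_target_phrase(rel_a, rel_b, shared_type):
--     rel_a = _relation_slug(rel_a)
--     rel_b = _relation_slug(rel_b)
--     shared_type = _normalize_tail_type(shared_type)
--     entry = _TABLE.get(shared_type)
--     if entry is None:
--         return "共同关联的目标"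
--     return _phrase_for(rel_a, rel_b, entry)
-- ===== Notes on version B (the rewrite author's own statement) =====
-- stated objective: alternative
-- what changed: Instead of A's rule-by-rule cascade that tests both relations against each keyword group in turn, B extracts for each relation independently the set of rule indices whose keywords it contains, intersects the two sets, and returns the phrase of the minimum common index (per-type tables of groups/phrases/default; unmatched types fall to the global default).
import Mathlib
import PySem

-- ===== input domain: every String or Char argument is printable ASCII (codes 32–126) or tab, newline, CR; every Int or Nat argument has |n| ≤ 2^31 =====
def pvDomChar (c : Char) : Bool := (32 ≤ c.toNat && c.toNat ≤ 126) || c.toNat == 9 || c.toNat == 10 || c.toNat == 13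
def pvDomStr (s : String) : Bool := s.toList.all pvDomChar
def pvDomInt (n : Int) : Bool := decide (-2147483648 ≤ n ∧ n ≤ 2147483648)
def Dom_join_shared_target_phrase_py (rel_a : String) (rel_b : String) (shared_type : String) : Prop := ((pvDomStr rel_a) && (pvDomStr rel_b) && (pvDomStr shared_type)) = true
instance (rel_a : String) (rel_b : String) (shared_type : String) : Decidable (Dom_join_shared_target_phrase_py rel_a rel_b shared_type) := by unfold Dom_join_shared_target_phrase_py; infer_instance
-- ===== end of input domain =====

-- B replaces A's rule-by-rule cascade (each rule testing BOTH relations) by per-relation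
-- feature extraction: each relation's set of matching rule indices is computed independently,
-- the two sets are intersected, and the phrase of the minimum common index is returned;
-- objective: alternative.

-- ===== PORT A =====
-- helper _relation_slug
def pvRelationSlug (rel : String) : String :=
  PySem.Str.replace (PySem.Str.lower (PySem.Str.strip rel)) " " "_"

-- helper _normalize_tail_type (the argument is always a str here, so the isinstance branch is vacuous)
def pvNormalizeTailType (value : String) : String :=
  let normalized := PySem.Str.upper (PySem.Str.strip value)
  if (PySem.Set.ofList ["TIME", "QUANTITY", "LOCATION", "PERSON", "ORG", "OTHER"]).contains normalized
  then normalized else "OTHER"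

def join_shared_target_phrase_py (rel_a : String) (rel_b : String) (shared_type : String) : String :=
  let ra := pvRelationSlug rel_a
  let rb := pvRelationSlug rel_b
  let st := pvNormalizeTailType shared_type
  if st = "LOCATION" then
    if [ra, rb].all (fun rel => ["performed_at", "staged_at", "played_at", "premiered_at", "opened_at"].any (fun k => PySem.Str.isIn k rel)) then "共同关联的演出地点"
    else if [ra, rb].all (fun rel => ["headquartered", "based_in"].any (fun k => PySem.Str.isIn k rel)) then "共同关联的总部所在地"
    else if [ra, rb].all (fun rel => ["born_in", "origin", "from"].any (fun k => PySem.Str.isIn k rel)) then "共同关联的出生地"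
    else "共同关联的地点"
  else if st = "PERSON" then
    if [ra, rb].all (fun rel => ["founder", "founded_by"].any (fun k => PySem.Str.isIn k rel)) then "共同关联的创始人"
    else if [ra, rb].all (fun rel => PySem.Str.isIn "ceo" rel) then "共同关联的负责人"
    else if [ra, rb].all (fun rel => ["author", "writer"].any (fun k => PySem.Str.isIn k rel)) then "共同关联的作者"
    else if [ra, rb].all (fun rel => PySem.Str.isIn "lyrics" rel) then "共同关联的作词者"
    else if [ra, rb].all (fun rel => ["composer", "music_by"].any (fun k => PySem.Str.isIn k rel)) then "共同关联的作曲者"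
    else if [ra, rb].all (fun rel => ["director", "directed_by"].any (fun k => PySem.Str.isIn k rel)) then "共同关联的导演"
    else "共同关联到的人物"
  else if st = "ORG" then
    if [ra, rb].all (fun rel => ["headquartered", "based_in"].any (fun k => PySem.Str.isIn k rel)) then "共同关联的机构"
    else if [ra, rb].all (fun rel => ["parent", "owned_by", "brand_of"].any (fun k => PySem.Str.isIn k rel)) then "共同关联的上级组织"
    else "共同关联的组织"
  else
    PySem.Dict.getD (PySem.Dict.ofList [("PERSON", "共同关联到的人物"), ("ORG", "共同关联的组织"), ("LOCATION", "共同关联的地点")]) st "共同关联的目标"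

-- ===== PORT B =====
-- the _TABLE of Source B: keyword groups, their phrases, and the per-type default
def pvTableB : PySem.Dict String (List (List String) × List String × String) :=
  PySem.Dict.ofList
    [ ("LOCATION",
        ([ ["performed_at", "staged_at", "played_at", "premiered_at", "opened_at"],
           ["headquartered", "based_in"],
           ["born_in", "origin", "from"] ],
         ["共同关联的演出地点", "共同关联的总部所在地", "共同关联的出生地"],
         "共同关联的地点")),
      ("PERSON",
        ([ ["founder", "founded_by"], ["ceo"], ["author", "writer"],
           ["lyrics"], ["composer", "music_by"], ["director", "directed_by"] ],
         ["共同关联的创始人", "共同关联的负责人", "共同关联的作者",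
          "共同关联的作词者", "共同关联的作曲者", "共同关联的导演"],
         "共同关联到的人物")),
      ("ORG",
        ([ ["headquartered", "based_in"], ["parent", "owned_by", "brand_of"] ],
         ["共同关联的机构", "共同关联的上级组织"],
         "共同关联的组织")) ]

-- _match_ids of Source B: the set of group indices whose keywords occur in rel
def pvMatchIds (rel : String) (groups : List (List String)) : PySem.Set Int :=
  PySem.Set.ofList
    (((PySem.List.enumerate groups 0).filter
        (fun p => p.2.any (fun k => PySem.Str.isIn k rel))).map Prod.fst)

-- _phrase_for of Source B: intersect the two index sets, answer with the minimum common index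
def pvPhraseFor (ra rb : String) (entry : List (List String) × List String × String) : String :=
  let groups := entry.1
  let phrases := entry.2.1
  let dflt := entry.2.2
  let common := PySem.Set.inter (pvMatchIds ra groups) (pvMatchIds rb groups)
  -- 'phrases[min(common)] if common else default'; min over a set of ints is order-safe,
  -- and the index is always in range (len(phrases) = len(groups)), so getD's fallback is unreachable
  match PySem.List.min? common (fun x => x) with
  | none => dflt
  | some i => (PySem.List.pyGet? phrases i).getD dflt

def join_shared_target_phrase_py_alt (rel_a : String) (rel_b : String) (shared_type : String) : String :=
  let ra := pvRelationSlug rel_a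
  let rb := pvRelationSlug rel_b
  let st := pvNormalizeTailType shared_type
  match PySem.Dict.get? pvTableB st with
  | none => "共同关联的目标"
  | some entry => pvPhraseFor ra rb entry

-- ===== PRECONDITION & SPEC =====
def Spec_join_shared_target_phrase_py (rel_a : String) (rel_b : String) (shared_type : String) (out : String) : Prop := out = join_shared_target_phrase_py_alt rel_a rel_b shared_type
instance (rel_a : String) (rel_b : String) (shared_type : String) (out : String) : Decidable (Spec_join_shared_target_phrase_py rel_a rel_b shared_type out) := by unfold Spec_join_shared_target_phrase_py; infer_instance

-- ===== CLAIM (what is proved, stated in full; the proofs are below) =====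
def Claim_equal_join_shared_target_phrase_py : Prop := ∀ (rel_a : String) (rel_b : String) (shared_type : String), Dom_join_shared_target_phrase_py rel_a rel_b shared_type → Spec_join_shared_target_phrase_py rel_a rel_b shared_type (join_shared_target_phrase_py rel_a rel_b shared_type)

-- ===== LEMMAS AND PROOFS =====

-- the normalized tail type is one of the six enum literals
lemma pvNormalize_cases (v : String) :
    pvNormalizeTailType v = "TIME" ∨ pvNormalizeTailType v = "QUANTITY" ∨
    pvNormalizeTailType v = "LOCATION" ∨ pvNormalizeTailType v = "PERSON" ∨
    pvNormalizeTailType v = "ORG" ∨ pvNormalizeTailType v = "OTHER" := by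
  unfold pvNormalizeTailType
  set n := PySem.Str.upper (PySem.Str.strip v) with hn
  by_cases h : (PySem.Set.ofList ["TIME", "QUANTITY", "LOCATION", "PERSON", "ORG", "OTHER"]).contains n = true
  · rw [if_pos h]
    have := (PySem.Set.contains_iff _ n).mp h
    simp [PySem.Set.ofList] at this
    rcases this with h | h | h | h | h | h <;> simp [h]
  · rw [if_neg h]; simp

-- the raw (pre-ofList) index list behind pvMatchIds
def pvMatchedRaw (rel : String) (groups : List (List String)) : List Int :=
  ((PySem.List.enumerate groups 0).filter
      (fun p => p.2.any (fun k => PySem.Str.isIn k rel))).map Prod.fst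

lemma matchedRaw_pairwise (rel : String) (gs : List (List String)) :
    (pvMatchedRaw rel gs).Pairwise (· < ·) := by
  unfold pvMatchedRaw
  rw [List.pairwise_map]
  exact (PySem.List.pairwise_lt_enumerate gs 0).filter _

lemma matchedRaw_nodup (rel : String) (gs : List (List String)) :
    (pvMatchedRaw rel gs).Nodup :=
  (matchedRaw_pairwise rel gs).imp ne_of_lt

lemma matchIds_eq_raw (rel : String) (gs : List (List String)) :
    pvMatchIds rel gs = pvMatchedRaw rel gs :=
  PySem.Set.ofList_eq_self_of_nodup _ (matchedRaw_nodup rel gs)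

lemma mem_matchedRaw (rel : String) (gs : List (List String)) (i : Int) :
    i ∈ pvMatchedRaw rel gs ↔
      ∃ (k : Nat), ∃ (h : k < gs.length), i = (k : Int) ∧ gs[k].any (fun kw => PySem.Str.isIn kw rel) = true := by
  unfold pvMatchedRaw
  simp only [List.mem_map, List.mem_filter, PySem.List.mem_enumerate_iff]
  constructor
  · rintro ⟨p, ⟨⟨k, hk, rfl⟩, hq⟩, rfl⟩
    exact ⟨k, hk, by simpa using hq⟩
  · rintro ⟨k, hk, rfl, hq⟩
    exact ⟨(0 + (k:Int), gs[k]), ⟨⟨k, hk, rfl⟩, hq⟩, by simp⟩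

-- the intersection loop, abstracted: filtering the first index list by membership in the
-- second равно filtering the enumerated groups by the conjoined test
lemma pvInterAux (ra rb : String) (sb : List Int) (e : List (Int × List String)) :
    (∀ p ∈ e, PySem.Set.contains sb p.1 = p.2.any (fun k => PySem.Str.isIn k rb)) →
    ((e.filter (fun p => p.2.any (fun k => PySem.Str.isIn k ra))).map Prod.fst).filter
        (fun x => PySem.Set.contains sb x)
      = (e.filter (fun p => (p.2.any (fun k => PySem.Str.isIn k ra)) &&
                            (p.2.any (fun k => PySem.Str.isIn k rb)))).map Prod.fst := by
  induction e with
  | nil => intro _; rfl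
  | cons x xs ih =>
    intro hsb
    have hx : PySem.Set.contains sb x.1 = x.2.any (fun k => PySem.Str.isIn k rb) :=
      hsb x List.mem_cons_self
    have ih' := ih (fun p hp => hsb p (List.mem_cons_of_mem _ hp))
    simp only [List.filter_cons]
    split_ifs with h1 h2
    · rw [Bool.and_eq_true] at h2
      have hq : PySem.Set.contains sb x.1 = true := hx.trans h2.2
      simp only [List.map_cons, List.filter_cons, hq, if_true, ih']
    · have hQ : ¬ (x.2.any (fun k => PySem.Str.isIn k rb)) = true := by
        intro hq
        rw [Bool.and_eq_true] at h2
        exact h2 ⟨h1, hq⟩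
      have hqf : PySem.Set.contains sb x.1 = false :=
        hx.trans (Bool.eq_false_iff.mpr hQ)
      simp only [List.map_cons, List.filter_cons, hqf, Bool.false_eq_true, if_false, ih']
    · rename_i h2
      rw [Bool.and_eq_true] at h2
      exact absurd h2.1 h1
    · exact ih'

lemma inter_matched (ra rb : String) (gs : List (List String)) :
    PySem.Set.inter (pvMatchIds ra gs) (pvMatchIds rb gs)
      = ((PySem.List.enumerate gs 0).filter
          (fun p => (p.2.any (fun k => PySem.Str.isIn k ra)) &&
                    (p.2.any (fun k => PySem.Str.isIn k rb)))).map Prod.fst := by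
  rw [matchIds_eq_raw, matchIds_eq_raw]
  show (pvMatchedRaw ra gs).filter (fun x => PySem.Set.contains (pvMatchedRaw rb gs) x) = _
  refine Eq.trans ?_ (pvInterAux ra rb (pvMatchedRaw rb gs) (PySem.List.enumerate gs 0) ?_)
  · rfl
  · intro p hp
    rcases (PySem.List.mem_enumerate_iff _ _ _).mp hp with ⟨k, hk, rfl⟩
    rw [Bool.eq_iff_iff, PySem.Set.contains_iff, mem_matchedRaw]
    constructor
    · rintro ⟨j, hj, hjk, hq⟩
      have hjke : k = j := by simpa using hjk
      subst hjke; simpa using hq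
    · intro hq
      exact ⟨k, hk, by simp, by simpa using hq⟩

lemma alt_some (ra rb : String) (e : List (List String) × List String × String) :
    (match some e with
     | none => "共同关联的目标"
     | some entry => pvPhraseFor ra rb entry) = pvPhraseFor ra rb e := rfl

-- with the normalized type fixed, A's cascade and B's intersect-and-min computation coincide
lemma dispatch_eq (ra rb st : String)
    (h : st = "TIME" ∨ st = "QUANTITY" ∨ st = "LOCATION" ∨ st = "PERSON" ∨
         st = "ORG" ∨ st = "OTHER") :
    (if st = "LOCATION" then
      if [ra, rb].all (fun rel => ["performed_at", "staged_at", "played_at", "premiered_at", "opened_at"].any (fun k => PySem.Str.isIn k rel)) then "共同关联的演出地点"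
      else if [ra, rb].all (fun rel => ["headquartered", "based_in"].any (fun k => PySem.Str.isIn k rel)) then "共同关联的总部所在地"
      else if [ra, rb].all (fun rel => ["born_in", "origin", "from"].any (fun k => PySem.Str.isIn k rel)) then "共同关联的出生地"
      else "共同关联的地点"
    else if st = "PERSON" then
      if [ra, rb].all (fun rel => ["founder", "founded_by"].any (fun k => PySem.Str.isIn k rel)) then "共同关联的创始人"
      else if [ra, rb].all (fun rel => PySem.Str.isIn "ceo" rel) then "共同关联的负责人"
      else if [ra, rb].all (fun rel => ["author", "writer"].any (fun k => PySem.Str.isIn k rel)) then "共同关联的作者"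
      else if [ra, rb].all (fun rel => PySem.Str.isIn "lyrics" rel) then "共同关联的作词者"
      else if [ra, rb].all (fun rel => ["composer", "music_by"].any (fun k => PySem.Str.isIn k rel)) then "共同关联的作曲者"
      else if [ra, rb].all (fun rel => ["director", "directed_by"].any (fun k => PySem.Str.isIn k rel)) then "共同关联的导演"
      else "共同关联到的人物"
    else if st = "ORG" then
      if [ra, rb].all (fun rel => ["headquartered", "based_in"].any (fun k => PySem.Str.isIn k rel)) then "共同关联的机构"
      else if [ra, rb].all (fun rel => ["parent", "owned_by", "brand_of"].any (fun k => PySem.Str.isIn k rel)) then "共同关联的上级组织"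
      else "共同关联的组织"
    else
      PySem.Dict.getD (PySem.Dict.ofList [("PERSON", "共同关联到的人物"), ("ORG", "共同关联的组织"), ("LOCATION", "共同关联的地点")]) st "共同关联的目标")
    =
    (match PySem.Dict.get? pvTableB st with
     | none => "共同关联的目标"
     | some entry => pvPhraseFor ra rb entry) := by
  rcases h with h | h | h | h | h | h <;> subst h
  · rw [if_neg (by decide), if_neg (by decide), if_neg (by decide),
        show PySem.Dict.get? pvTableB "TIME" = none from rfl]
    rfl
  · rw [if_neg (by decide), if_neg (by decide), if_neg (by decide),
        show PySem.Dict.get? pvTableB "QUANTITY" = none from rfl]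
    rfl
  · rw [if_pos rfl,
        show PySem.Dict.get? pvTableB "LOCATION" = some
          ([ ["performed_at", "staged_at", "played_at", "premiered_at", "opened_at"],
             ["headquartered", "based_in"],
             ["born_in", "origin", "from"] ],
           ["共同关联的演出地点", "共同关联的总部所在地", "共同关联的出生地"],
           "共同关联的地点") from rfl, alt_some]
    simp only [pvPhraseFor]
    rw [inter_matched]
    simp only [PySem.List.enumerate_cons, PySem.List.enumerate_nil, List.filter_cons,
               List.filter_nil, List.all_cons, List.all_nil, Bool.and_true,
               List.any_cons, List.any_nil, Bool.or_false]
    split_ifs <;> decide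
  · rw [if_neg (by decide), if_pos rfl,
        show PySem.Dict.get? pvTableB "PERSON" = some
          ([ ["founder", "founded_by"], ["ceo"], ["author", "writer"],
             ["lyrics"], ["composer", "music_by"], ["director", "directed_by"] ],
           ["共同关联的创始人", "共同关联的负责人", "共同关联的作者",
            "共同关联的作词者", "共同关联的作曲者", "共同关联的导演"],
           "共同关联到的人物") from rfl, alt_some]
    simp only [pvPhraseFor]
    rw [inter_matched]
    simp only [PySem.List.enumerate_cons, PySem.List.enumerate_nil, List.filter_cons,
               List.filter_nil, List.all_cons, List.all_nil, Bool.and_true,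
               List.any_cons, List.any_nil, Bool.or_false]
    split_ifs <;> decide
  · rw [if_neg (by decide), if_neg (by decide), if_pos rfl,
        show PySem.Dict.get? pvTableB "ORG" = some
          ([ ["headquartered", "based_in"], ["parent", "owned_by", "brand_of"] ],
           ["共同关联的机构", "共同关联的上级组织"],
           "共同关联的组织") from rfl, alt_some]
    simp only [pvPhraseFor]
    rw [inter_matched]
    simp only [PySem.List.enumerate_cons, PySem.List.enumerate_nil, List.filter_cons,
               List.filter_nil, List.all_cons, List.all_nil, Bool.and_true,
               List.any_cons, List.any_nil, Bool.or_false]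
    split_ifs <;> decide
  · rw [if_neg (by decide), if_neg (by decide), if_neg (by decide),
        show PySem.Dict.get? pvTableB "OTHER" = none from rfl]
    rfl

-- ===== VERDICT (by name: the statement is the Claim_ definition above) =====
set_option maxHeartbeats 1000000 in
theorem join_shared_target_phrase_py_spec : Claim_equal_join_shared_target_phrase_py := by
  intro rel_a rel_b shared_type _
  unfold Spec_join_shared_target_phrase_py
  unfold join_shared_target_phrase_py join_shared_target_phrase_py_alt
  exact dispatch_eq (pvRelationSlug rel_a) (pvRelationSlug rel_b)
    (pvNormalizeTailType shared_type) (pvNormalize_cases shared_type)
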